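-- pv_equiv track=rewrite | github.com/AmenZhou/calibre_scripts | mybookshelf2/parallel_migrate.py | calculate_worker_ranges
-- ===== SOURCE A (Python) =====
-- from typing import List, Tuple
--
-- def calculate_worker_ranges(total_books: int, num_workers: int) -> List[Tuple[int, int]]:
--     """Calculate database offset ranges for each worker"""
--     books_per_worker = total_books // num_workers
--     remainder = total_books % num_workers
--
--     ranges = []
--     offset = 0
--
--     for i in range(num_workers):
--         # Distribute remainder across first few workers
--         count = books_per_worker + (1 if i < remainder else 0)
--         ranges.append((offset, count))
--         offset += count
--
--     return ranges
-- ===== SOURCE B (Python) =====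
-- def calculate_worker_ranges(total_books: int, num_workers: int):
--     """Calculate database offset ranges for each worker (closed form per worker)."""
--     books_per_worker = total_books // num_workers
--     remainder = total_books % num_workers
--     return [(i * books_per_worker + min(i, remainder),
--              books_per_worker + (1 if i < remainder else 0))
--             for i in range(num_workers)]
-- ===== Notes on version B (the rewrite author's own statement) =====
-- stated objective: alternative
-- what changed: Replaced the running-offset accumulator loop with a per-worker closed form: offset(i) = i*books_per_worker + min(i, remainder), computed independently in a comprehension.
import Mathlib
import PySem

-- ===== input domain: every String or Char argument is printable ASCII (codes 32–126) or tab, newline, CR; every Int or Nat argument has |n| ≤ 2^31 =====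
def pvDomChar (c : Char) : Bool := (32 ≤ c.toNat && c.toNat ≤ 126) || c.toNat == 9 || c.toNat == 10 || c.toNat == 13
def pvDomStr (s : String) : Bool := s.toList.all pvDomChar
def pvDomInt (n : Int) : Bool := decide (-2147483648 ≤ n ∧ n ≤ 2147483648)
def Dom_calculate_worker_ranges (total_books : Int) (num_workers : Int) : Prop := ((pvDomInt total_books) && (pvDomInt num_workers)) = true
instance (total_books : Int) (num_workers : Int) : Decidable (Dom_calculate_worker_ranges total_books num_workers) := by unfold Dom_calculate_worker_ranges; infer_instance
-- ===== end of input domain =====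

-- B replaces A's running-offset accumulator with a per-worker closed form (offset = i*q + min i r); alternative decomposition, same cost.


-- ===== PORT A =====
def calculate_worker_ranges (total_books : Int) (num_workers : Int) : List (Int × Int) :=
  let books_per_worker := PySem.Int.floordiv total_books num_workers
  let remainder := PySem.Int.mod total_books num_workers
  let st := (PySem.List.pyRange 0 num_workers 1).foldl
    (fun (st : List (Int × Int) × Int) i =>
      let count := books_per_worker + (if i < remainder then 1 else 0)
      (st.1 ++ [(st.2, count)], st.2 + count))
    ([], 0)
  st.1

-- ===== PORT B =====
def calculate_worker_ranges_alt (total_books : Int) (num_workers : Int) : List (Int × Int) :=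
  let books_per_worker := PySem.Int.floordiv total_books num_workers
  let remainder := PySem.Int.mod total_books num_workers
  (PySem.List.pyRange 0 num_workers 1).map
    (fun i => (i * books_per_worker + min i remainder,
               books_per_worker + (if i < remainder then 1 else 0)))

-- ===== PRECONDITION & SPEC =====
-- Pre_ excludes only num_workers == 0, where A (and B) raise ZeroDivisionError.
def Pre_calculate_worker_ranges (total_books : Int) (num_workers : Int) : Prop := num_workers ≠ 0
instance (total_books : Int) (num_workers : Int) : Decidable (Pre_calculate_worker_ranges total_books num_workers) := by unfold Pre_calculate_worker_ranges; infer_instance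
def pvWitness_calculate_worker_ranges : Int × Int := (10, 3)
def Spec_calculate_worker_ranges (total_books : Int) (num_workers : Int) (out : List (Int × Int)) : Prop := out = calculate_worker_ranges_alt total_books num_workers
instance (total_books : Int) (num_workers : Int) (out : List (Int × Int)) : Decidable (Spec_calculate_worker_ranges total_books num_workers out) := by unfold Spec_calculate_worker_ranges; infer_instance

-- ===== CLAIM (what is proved, stated in full; the proofs are below) =====
def Claim_equal_calculate_worker_ranges : Prop := ∀ (total_books : Int) (num_workers : Int), Dom_calculate_worker_ranges total_books num_workers → Pre_calculate_worker_ranges total_books num_workers → Spec_calculate_worker_ranges total_books num_workers (calculate_worker_ranges total_books num_workers)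

-- ===== LEMMAS AND PROOFS =====

-- Loop invariant: after folding over 0..n-1, the accumulated list equals the closed-form map
-- and the running offset equals n*q + min n r (needs 0 ≤ r, which holds since the divisor is positive there).
theorem cwr_fold_eq (q r : Int) (hr : 0 ≤ r) (n : Nat) :
    (PySem.List.pyRange 0 (n : Int) 1).foldl
      (fun (st : List (Int × Int) × Int) i =>
        let count := q + (if i < r then 1 else 0)
        (st.1 ++ [(st.2, count)], st.2 + count))
      ([], 0)
    = ((PySem.List.pyRange 0 (n : Int) 1).map
        (fun i => (i * q + min i r, q + (if i < r then 1 else 0))),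
       (n : Int) * q + min (n : Int) r) := by
  induction n with
  | zero => simp [PySem.List.pyRange_one_eq_nil (by norm_num : (0:Int) ≤ 0)]
            omega
  | succ m ih =>
    have h : ((m + 1 : Nat) : Int) = (m : Int) + 1 := by push_cast; ring
    rw [h, PySem.List.pyRange_one_succ_right (by positivity)]
    simp only [List.foldl_append, List.map_append, ih, List.foldl_cons, List.foldl_nil,
      List.map_cons, List.map_nil]
    simp only [Prod.mk.injEq]
    refine ⟨trivial, ?_⟩
    have hq : ((m : Int) + 1) * q = (m : Int) * q + q := by ring
    rw [hq]
    split_ifs with hlt <;> omega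

theorem calculate_worker_ranges_eq (total_books num_workers : Int)
    (hnw : num_workers ≠ 0) :
    calculate_worker_ranges total_books num_workers
      = calculate_worker_ranges_alt total_books num_workers := by
  simp only [calculate_worker_ranges, calculate_worker_ranges_alt]
  rcases lt_or_gt_of_ne hnw with hneg | hpos
  · rw [PySem.List.pyRange_one_eq_nil (by omega)]
    simp
  · have hcast : num_workers = (num_workers.toNat : Int) := by omega
    rw [hcast] at hpos ⊢
    have hr : 0 ≤ PySem.Int.mod total_books (num_workers.toNat : Int) :=
      PySem.Int.mod_nonneg total_books hpos
    rw [cwr_fold_eq _ _ hr num_workers.toNat]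

-- ===== VERDICT (by name: the statement is the Claim_ definition above) =====
theorem calculate_worker_ranges_spec : Claim_equal_calculate_worker_ranges := by
  intro t n _ hpre
  exact calculate_worker_ranges_eq t n hpre
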